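-- pv_equiv track=rewrite | github.com/winstonwzhang/osu_seq2seq | math_tools.py | _split_at_dupes
-- ===== SOURCE A (Python) =====
-- def _split_at_dupes(input_):
--     """Split a sequence of points on duplicates.
--     Parameters
--     ----------
--     inp : list[any]
--         The input sequence to split.
--     Yields
--     ------
--     group : list[any]
--         The groups split on duplicates.
--     """
--     old_ix = 0
--     for n, (a, b) in enumerate(zip(input_, input_[1:]), 1):
--         if a == b:
--             yield input_[old_ix:n]
--             old_ix = n
--
--     tail = input_[old_ix:]
--     if tail:
--         yield tail
-- ===== SOURCE B (Python) =====
-- def _split_at_dupes(input_):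
--     """Split a sequence of points on duplicates (group-accumulation rewrite)."""
--     cur = []
--     for x in input_:
--         if cur and cur[-1] == x:
--             yield cur
--             cur = [x]
--         else:
--             cur = cur + [x]
--     if cur:
--         yield cur
-- ===== Notes on version B (the rewrite author's own statement) =====
-- stated objective: alternative
-- what changed: B builds each group element by element in an accumulator (closing the group when the new element equals the group's last), instead of A's index bookkeeping over enumerate(zip(...)) with slicing; no indices or slices at all.
import Mathlib
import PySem

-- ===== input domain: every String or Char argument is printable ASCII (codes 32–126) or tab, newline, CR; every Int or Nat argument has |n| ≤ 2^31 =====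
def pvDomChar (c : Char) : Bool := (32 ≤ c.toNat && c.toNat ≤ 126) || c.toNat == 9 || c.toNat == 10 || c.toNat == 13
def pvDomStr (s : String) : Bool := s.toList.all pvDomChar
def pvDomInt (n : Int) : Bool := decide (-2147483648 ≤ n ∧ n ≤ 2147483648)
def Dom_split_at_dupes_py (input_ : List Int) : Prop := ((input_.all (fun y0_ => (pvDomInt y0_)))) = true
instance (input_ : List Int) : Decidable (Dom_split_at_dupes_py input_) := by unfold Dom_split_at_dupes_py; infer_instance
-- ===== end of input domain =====

-- B rebuilds each group element by element in an accumulator (closing a group when the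
-- incoming element equals the group's last), replacing A's enumerate/zip index bookkeeping
-- and slicing; an alternative decomposition of the same cost (equivalence is about the list
-- of yielded groups: both Pythons are generators).


-- ===== PORT A =====
-- loop body: if a == b: yield input_[old_ix:n]; old_ix = n
def stepA (input_ : List Int) (st : List (List Int) × Int) (p : Int × (Int × Int)) : List (List Int) × Int :=
  if p.2.1 = p.2.2 then (st.1 ++ [PySem.List.slice input_ (some st.2) (some p.1)], p.1) else st

-- for n, (a, b) in enumerate(zip(input_, input_[1:]), 1): …; tail = input_[old_ix:]; if tail: yield tail
def split_at_dupes_py (input_ : List Int) : List (List Int) :=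
  let st := (PySem.List.enumerate (input_.zip (PySem.List.slice input_ (some 1) none)) 1).foldl
    (stepA input_) ([], 0)
  let tail := PySem.List.slice input_ (some st.2) none
  if tail ≠ [] then st.1 ++ [tail] else st.1

-- ===== PORT B =====
-- loop body: if cur and cur[-1] == x: yield cur; cur = [x]  else: cur = cur + [x]
def stepB (st : List (List Int) × List Int) (x : Int) : List (List Int) × List Int :=
  if st.2 ≠ [] ∧ PySem.List.pyGet? st.2 (-1) = some x then (st.1 ++ [st.2], [x])
  else (st.1, st.2 ++ [x])

def split_at_dupes_py_alt (input_ : List Int) : List (List Int) :=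
  let st := input_.foldl stepB ([], [])
  if st.2 ≠ [] then st.1 ++ [st.2] else st.1

-- ===== PRECONDITION & SPEC =====
def Spec_split_at_dupes_py (input_ : List Int) (out : List (List Int)) : Prop := out = split_at_dupes_py_alt input_
instance (input_ : List Int) (out : List (List Int)) : Decidable (Spec_split_at_dupes_py input_ out) := by unfold Spec_split_at_dupes_py; infer_instance

-- ===== CLAIM (what is proved, stated in full; the proofs are below) =====
def Claim_equal_split_at_dupes_py : Prop := ∀ (input_ : List Int), Dom_split_at_dupes_py input_ → Spec_split_at_dupes_py input_ (split_at_dupes_py input_)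

-- ===== LEMMAS AND PROOFS =====

-- reference recursion both loops compute: cur is the open (nonempty) group, a its last element
def goSpec : List Int → Int → List Int → List (List Int)
  | cur, _, [] => [cur]
  | cur, a, x :: xs => if a = x then cur :: goSpec [x] x xs else goSpec (cur ++ [x]) x xs

-- B's loop + final flush computes goSpec
lemma bLoop (s : List Int) : ∀ (groups : List (List Int)) (cur : List Int) (a : Int),
    cur.getLast? = some a →
    (if (s.foldl stepB (groups, cur)).2 ≠ [] then
        (s.foldl stepB (groups, cur)).1 ++ [(s.foldl stepB (groups, cur)).2]
      else (s.foldl stepB (groups, cur)).1)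
      = groups ++ goSpec cur a s := by
  induction s with
  | nil =>
    intro groups cur a h
    have hne : cur ≠ [] := by rintro rfl; simp at h
    simp [goSpec, hne]
  | cons x s ih =>
    intro groups cur a h
    have hne : cur ≠ [] := by rintro rfl; simp at h
    by_cases hax : a = x
    · have : stepB (groups, cur) x = (groups ++ [cur], [x]) := by
        simp [stepB, hne, PySem.List.pyGet?_neg_one, h, hax]
      simp only [List.foldl_cons, this]
      rw [ih (groups ++ [cur]) [x] x (by simp)]
      simp [goSpec, hax]
    · have : stepB (groups, cur) x = (groups, cur ++ [x]) := by
        simp [stepB, hne, PySem.List.pyGet?_neg_one, h]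
        exact hax
      simp only [List.foldl_cons, this]
      rw [ih groups (cur ++ [x]) x (by simp)]
      simp [goSpec, hax]

-- A's loop + tail emission computes goSpec; j is old_ix, n the enumerate counter,
-- a the element at index n-1, s the suffix input_[n:]
lemma aLoop (input_ : List Int) (s : List Int) : ∀ (j n : Nat) (a : Int) (acc : List (List Int)),
    ((input_.drop j).take (n - j)).getLast? = some a →
    input_.drop n = s →
    (if PySem.List.slice input_
          (some ((PySem.List.enumerate ((a :: s).zip s) (n : Int)).foldl (stepA input_) (acc, (j : Int))).2) none ≠ [] then
        ((PySem.List.enumerate ((a :: s).zip s) (n : Int)).foldl (stepA input_) (acc, (j : Int))).1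
          ++ [PySem.List.slice input_
                (some ((PySem.List.enumerate ((a :: s).zip s) (n : Int)).foldl (stepA input_) (acc, (j : Int))).2) none]
      else ((PySem.List.enumerate ((a :: s).zip s) (n : Int)).foldl (stepA input_) (acc, (j : Int))).1)
      = acc ++ goSpec ((input_.drop j).take (n - j)) a s := by
  induction s with
  | nil =>
    intro j n a acc hlast hdrop
    have hlen : input_.length ≤ n := by
      have := congrArg List.length hdrop; simp at this; omega
    have hfull : (input_.drop j).take (n - j) = input_.drop j := by
      apply List.take_of_length_le; simp; omega
    have hne : (input_.drop j).take (n - j) ≠ [] := by rintro h; rw [h] at hlast; simp at hlast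
    simp only [List.zip_nil_right, PySem.List.enumerate_nil, List.foldl_nil]
    rw [PySem.List.slice_from_natCast]
    rw [hfull] at hne ⊢
    simp [goSpec, hne]
  | cons b t ih =>
    intro j n a acc hlast hdrop
    have hb : input_[n]? = some b := by
      have : (input_.drop n)[0]? = some b := by rw [hdrop]; rfl
      simpa using this
    have hdt : input_.drop (n + 1) = t := by
      have := congrArg List.tail hdrop
      simpa [List.tail_drop] using this
    have hcast : (n : Int) + 1 = ((n + 1 : Nat) : Int) := by push_cast; ring
    simp only [List.zip_cons_cons, PySem.List.enumerate_cons, List.foldl_cons]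
    by_cases hab : a = b
    · have hstep : stepA input_ (acc, (j : Int)) ((n : Int), (a, b)) =
          (acc ++ [PySem.List.slice input_ (some (j : Int)) (some (n : Int))], (n : Int)) := by
        simp [stepA, hab]
      rw [hstep, PySem.List.slice_natCast, hcast]
      have hcur1 : (input_.drop n).take ((n + 1) - n) = [b] := by
        simp [hdrop]
      rw [ih n (n + 1) b
            (acc ++ [(input_.drop j).take (n - j)])
            (by rw [hcur1]; rfl) hdt]
      rw [hcur1]
      simp [goSpec, hab]
    · have hstep : stepA input_ (acc, (j : Int)) ((n : Int), (a, b)) = (acc, (j : Int)) := by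
        simp [stepA, hab]
      rw [hstep, hcast]
      have hjn : j ≤ n := by
        by_contra hc
        have : n - j = 0 := by omega
        rw [this] at hlast; simp at hlast
      have hnlen : n < input_.length := by
        by_contra hc
        rw [List.getElem?_eq_none (by omega)] at hb; simp at hb
      have hcur : (input_.drop j).take ((n + 1) - j) = (input_.drop j).take (n - j) ++ [b] := by
        have h1 : (n + 1) - j = (n - j) + 1 := by omega
        rw [h1, List.take_add_one]
        congr 1
        have : (input_.drop j)[n - j]? = input_[j + (n - j)]? := List.getElem?_drop ..
        rw [this, Nat.add_sub_cancel' hjn, hb]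
        rfl
      rw [ih j (n + 1) b acc (by rw [hcur]; simp) hdt, hcur]
      simp [goSpec, hab]

-- ===== VERDICT (by name: the statement is the Claim_ definition above) =====
theorem split_at_dupes_py_spec : Claim_equal_split_at_dupes_py := by
  unfold Claim_equal_split_at_dupes_py
  intro input_ _
  unfold Spec_split_at_dupes_py
  cases input_ with
  | nil => decide
  | cons x rest =>
    show split_at_dupes_py (x :: rest) = split_at_dupes_py_alt (x :: rest)
    unfold split_at_dupes_py split_at_dupes_py_alt
    simp only [PySem.List.slice_from_one, List.tail_cons, List.foldl_cons]
    have hA := aLoop (x :: rest) rest 0 1 x [] (by simp) (by simp)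
    have h0 : stepB ([], []) x = ([], [x]) := by simp [stepB]
    have hB := bLoop rest [] [x] x (by simp)
    simp only [Nat.cast_zero, Nat.cast_one] at hA
    simp only [List.drop_zero] at hA
    rw [h0, hA, hB]
    simp
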